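-- pv_equiv track=rewrite | github.com/nhuannguyen1/pyRevitnvn | pyRevitnvn.tab/Training.panel/reau.pushbutton/script.py | get_corr_lines
-- ===== SOURCE A (Python) =====
-- def plot_design_cordninates(list_values):
--     """
--     :param list_values: a list of grid spacings, i.e. [1,3,5], the spacing is 1, 3, 5
--     :return: A list of where the ith grid spacing is, i.e [1,4,9] (first line is at 1, second at 4, etc)
--     """
--     new_list_cor = []
--     sum_val = 0
--     for i in list_values:
--         sum_val += i
--         new_list_cor.append(sum_val)
--     return new_list_cor
--
-- def get_corr_lines(far_pos, grid_line_spacing):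
--     """
--     Gets the corner_lines position
--     :param far_pos: The position that is the farthest, either front to back or left to right
--     :param grid_line_spacing: The list that contains the grid line spacing of the of the dimension not stated above
--             (i.e. far_pos is back to front and list is left to right)
--     :return: corrlines_x, corr_lines_y
--     """
--     corr_lines_x = []
--     corr_lines_y = []
--     corr_x = [0, 0]
--     corr_y = [0, far_pos]
--     corr_lines_x.append(corr_x)
--     corr_lines_y.append(corr_y)
--     for x in plot_design_cordninates(grid_line_spacing):
--         corr_x = [x, x]
--         corr_y = [0, far_pos]
--         corr_lines_x.append(corr_x)
--         corr_lines_y.append(corr_y)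
--
--     return corr_lines_x, corr_lines_y
-- ===== SOURCE B (Python) =====
-- def get_corr_lines(far_pos, grid_line_spacing):
--     # Build x positions back-to-front: start at the total span and subtract
--     # each spacing walking the list in reverse, then reverse the result.
--     s = sum(grid_line_spacing)
--     xs = []
--     for d in reversed(grid_line_spacing):
--         xs.append([s, s])
--         s -= d
--     xs.append([0, 0])
--     xs.reverse()
--     ys = [[0, far_pos] for _ in xs]
--     return xs, ys
-- ===== Notes on version B (the rewrite author's own statement) =====
-- stated objective: alternative
-- what changed: Instead of materializing forward prefix sums and looping over them, B builds the x-coordinates back-to-front (start at the total sum, subtract each spacing over the reversed list, then reverse) and derives the y-list from the x-list afterwards.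
import Mathlib
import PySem

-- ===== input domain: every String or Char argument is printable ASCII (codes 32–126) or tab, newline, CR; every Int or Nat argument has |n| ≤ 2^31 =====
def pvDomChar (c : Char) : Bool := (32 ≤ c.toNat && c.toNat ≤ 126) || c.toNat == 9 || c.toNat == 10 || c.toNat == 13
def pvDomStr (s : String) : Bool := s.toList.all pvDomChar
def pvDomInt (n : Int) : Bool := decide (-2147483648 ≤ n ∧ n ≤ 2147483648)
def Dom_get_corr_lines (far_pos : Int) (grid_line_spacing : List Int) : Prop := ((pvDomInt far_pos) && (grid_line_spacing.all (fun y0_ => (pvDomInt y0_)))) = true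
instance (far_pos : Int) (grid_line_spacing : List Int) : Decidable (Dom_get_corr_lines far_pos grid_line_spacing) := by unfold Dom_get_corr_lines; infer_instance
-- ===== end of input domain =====

-- B builds the x-coordinates back-to-front (total sum, subtracting over the reversed spacings, then reverse) and derives ys from xs; objective: alternative algorithm, same cost.


-- ===== PORT A =====
-- helper of A: builds the full prefix-sum list first
def plot_design_cordninates (list_values : List Int) : List Int :=
  (list_values.foldl
    (fun (st : List Int × Int) i =>
      let sum_val := st.2 + i
      (st.1 ++ [sum_val], sum_val))
    ([], 0)).1

def get_corr_lines (far_pos : Int) (grid_line_spacing : List Int) : List (List Int) × List (List Int) :=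
  (plot_design_cordninates grid_line_spacing).foldl
    (fun (st : List (List Int) × List (List Int)) x =>
      (st.1 ++ [[x, x]], st.2 ++ [[0, far_pos]]))
    ([[0, 0]], [[0, far_pos]])

-- ===== PORT B =====
-- back-to-front: walk reversed spacings subtracting from the total, then reverse; ys from xs
def get_corr_lines_alt (far_pos : Int) (grid_line_spacing : List Int) : List (List Int) × List (List Int) :=
  let st := grid_line_spacing.reverse.foldl
    (fun (st : List (List Int) × Int) d => (st.1 ++ [[st.2, st.2]], st.2 - d))
    ([], grid_line_spacing.sum)
  let xs := (st.1 ++ [[0, 0]]).reverse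
  let ys := xs.map (fun _ => [0, far_pos])
  (xs, ys)

-- ===== PRECONDITION & SPEC =====
def Spec_get_corr_lines (far_pos : Int) (grid_line_spacing : List Int) (out : List (List Int) × List (List Int)) : Prop := out = get_corr_lines_alt far_pos grid_line_spacing
instance (far_pos : Int) (grid_line_spacing : List Int) (out : List (List Int) × List (List Int)) : Decidable (Spec_get_corr_lines far_pos grid_line_spacing out) := by unfold Spec_get_corr_lines; infer_instance

-- ===== CLAIM (what is proved, stated in full; the proofs are below) =====
def Claim_equal_get_corr_lines : Prop := ∀ (far_pos : Int) (grid_line_spacing : List Int), Dom_get_corr_lines far_pos grid_line_spacing → Spec_get_corr_lines far_pos grid_line_spacing (get_corr_lines far_pos grid_line_spacing)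

-- ===== LEMMAS AND PROOFS =====

-- forward prefix sums starting at s
def pvSums (l : List Int) (s : Int) : List Int :=
  match l with
  | [] => []
  | d :: t => (s + d) :: pvSums t (s + d)

-- values produced by B's descending loop starting at s
def pvDec (l : List Int) (s : Int) : List (List Int) :=
  match l with
  | [] => []
  | d :: t => [s, s] :: pvDec t (s - d)

theorem pvPlotAux (l : List Int) : ∀ (acc : List Int) (s : Int),
    l.foldl (fun (st : List Int × Int) i => (st.1 ++ [st.2 + i], st.2 + i)) (acc, s)
      = (acc ++ pvSums l s, s + l.sum) := by
  induction l with
  | nil => intro acc s; simp [pvSums]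
  | cons d t ih =>
      intro acc s
      simp only [List.foldl_cons, pvSums, List.sum_cons]
      rw [ih]
      simp [List.append_assoc]; ring

theorem pvAFoldAux (fp : Int) (l : List Int) : ∀ (xs ys : List (List Int)),
    l.foldl
      (fun (st : List (List Int) × List (List Int)) x =>
        (st.1 ++ [[x, x]], st.2 ++ [[0, fp]])) (xs, ys)
      = (xs ++ l.map (fun x => [x, x]), ys ++ l.map (fun _ => [0, fp])) := by
  induction l with
  | nil => intro xs ys; simp
  | cons x t ih => intro xs ys; simp only [List.foldl_cons, List.map_cons]; rw [ih]; simp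

theorem pvBFoldAux (l : List Int) : ∀ (acc : List (List Int)) (s : Int),
    l.foldl (fun (st : List (List Int) × Int) d => (st.1 ++ [[st.2, st.2]], st.2 - d)) (acc, s)
      = (acc ++ pvDec l s, s - l.sum) := by
  induction l with
  | nil => intro acc s; simp [pvDec]
  | cons d t ih =>
      intro acc s
      simp only [List.foldl_cons, pvDec, List.sum_cons]
      rw [ih]
      simp [List.append_assoc]; ring

theorem pvDec_append (a b : List Int) (s : Int) :
    pvDec (a ++ b) s = pvDec a s ++ pvDec b (s - a.sum) := by
  induction a generalizing s with
  | nil => simp [pvDec]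
  | cons d t ih => simp [pvDec, ih, sub_sub]

theorem pvDec_reverse (l : List Int) : ∀ (s : Int),
    pvDec l.reverse (s + l.sum) = ((pvSums l s).map (fun x => [x, x])).reverse := by
  induction l with
  | nil => intro s; simp [pvDec, pvSums]
  | cons d t ih =>
      intro s
      have h : (d :: t).reverse = t.reverse ++ [d] := by simp
      rw [h, pvDec_append]
      simp only [List.sum_cons, List.sum_reverse]
      have h2 : s + (d + t.sum) = (s + d) + t.sum := by ring
      rw [h2, ih (s + d)]
      simp [pvDec, pvSums, add_sub_cancel_right]

-- ===== VERDICT (by name: the statement is the Claim_ definition above) =====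
theorem get_corr_lines_spec : Claim_equal_get_corr_lines := by
  intro fp gs _
  unfold Spec_get_corr_lines get_corr_lines get_corr_lines_alt plot_design_cordninates
  simp only
  rw [pvPlotAux gs [] 0, pvBFoldAux gs.reverse [] gs.sum]
  simp only [List.nil_append]
  have hd : pvDec gs.reverse gs.sum = ((pvSums gs 0).map (fun x => [x, x])).reverse := by
    have := pvDec_reverse gs 0
    simpa using this
  rw [pvAFoldAux, hd]
  simp [List.reverse_append, List.map_map]
  exact (List.map_const' (l := pvSums gs 0) (b := ([0, fp] : List Int))).symm
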